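-- pv_equiv track=rewrite | github.com/pc5401/my_BOJ | 백준/Gold/11058. 크리보드/크리보드.py | solve
-- ===== SOURCE A (Python) =====
-- def solve(N: int) -> int:
--     if N <= 6:
--         return N
--
--     dp = [i for i in range(N+1)]
--
--     for i in range(7, N+1):
--         dp[i] = dp[i-1] + 1
--
--         for j in range(i-3, 0, -1):
--             now = dp[j] * (i - j - 1)
--             dp[i] = max(dp[i], now)
--
--     return dp[N]
-- ===== SOURCE B (Python) =====
-- def solve(N: int) -> int:
--     if N <= 6:
--         return N
--     w = (2, 3, 4, 5, 6)  # dp[i-5], dp[i-4], dp[i-3], dp[i-2], dp[i-1]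
--     for _ in range(7, N + 1):
--         v1, v2, v3, v4, v5 = w
--         w = (v2, v3, v4, v5, max(v5 + 1, 2 * v3, 3 * v2, 4 * v1))
--     return w[4]
-- ===== Notes on version B (the rewrite author's own statement) =====
-- stated objective: faster
-- what changed: Replaces the quadratic DP whose inner loop rescans all previous keystroke counts by a linear sliding-window DP that keeps only the five most recent dp values, justified by a proved domination lemma: an inner-scan candidate with a larger multiplier never beats the window candidates.
import Mathlib
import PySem

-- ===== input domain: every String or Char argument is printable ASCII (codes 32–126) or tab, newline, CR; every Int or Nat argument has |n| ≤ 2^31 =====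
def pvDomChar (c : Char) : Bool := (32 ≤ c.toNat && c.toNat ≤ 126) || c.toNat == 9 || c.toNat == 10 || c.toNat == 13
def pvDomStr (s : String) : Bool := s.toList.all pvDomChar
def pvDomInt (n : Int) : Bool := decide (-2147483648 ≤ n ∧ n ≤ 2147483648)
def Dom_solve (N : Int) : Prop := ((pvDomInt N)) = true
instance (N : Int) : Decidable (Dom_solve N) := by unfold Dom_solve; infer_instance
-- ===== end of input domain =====

-- B is an O(N) sliding-window DP (last five dp values) replacing A's full O(N^2) inner scan; equal return value proved for all N.

-- ===== PORT A =====
-- Literal port of A: dp = list(range(N+1)); for i in range(7,N+1): dp[i]=dp[i-1]+1; for j in range(i-3,0,-1): dp[i]=max(dp[i],dp[j]*(i-j-1)); return dp[N].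
-- All list indices are in range for N ≥ 7, where pyGetD/pySetD are exact.
def solve (N : Int) : Int :=
  if N ≤ 6 then N
  else
    let dp0 : List Int := PySem.List.pyRange 0 (N + 1) 1
    let dp :=
      (PySem.List.pyRange 7 (N + 1) 1).foldl (fun dp i =>
        let dp := PySem.List.pySetD dp i (PySem.List.pyGetD dp (i - 1) 0 + 1)
        (PySem.List.pyRange (i - 3) 0 (-1)).foldl (fun dp j =>
          let now := PySem.List.pyGetD dp j 0 * (i - j - 1)
          PySem.List.pySetD dp i (max (PySem.List.pyGetD dp i 0) now)) dp) dp0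
    PySem.List.pyGetD dp N 0

-- ===== PORT B =====
-- w = (dp[i-5], dp[i-4], dp[i-3], dp[i-2], dp[i-1]); each loop iteration shifts the window.
def altStep (w : Int × Int × Int × Int × Int) : Int × Int × Int × Int × Int :=
  (w.2.1, w.2.2.1, w.2.2.2.1, w.2.2.2.2,
    max (max (w.2.2.2.2 + 1) (2 * w.2.2.1)) (max (3 * w.2.1) (4 * w.1)))

def altLoop : Nat → (Int × Int × Int × Int × Int) → (Int × Int × Int × Int × Int)
  | 0, w => w
  | n + 1, w => altLoop n (altStep w)

def solve_alt (N : Int) : Int :=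
  if N ≤ 6 then N
  else (altLoop (N - 6).toNat (2, 3, 4, 5, 6)).2.2.2.2

-- ===== PRECONDITION & SPEC =====
def Spec_solve (N : Int) (out : Int) : Prop := out = solve_alt N
instance (N : Int) (out : Int) : Decidable (Spec_solve N out) := by unfold Spec_solve; infer_instance

-- ===== CLAIM (what is proved, stated in full; the proofs are below) =====
def Claim_equal_solve : Prop := ∀ (N : Int), Dom_solve N → Spec_solve N (solve N)

-- ===== LEMMAS AND PROOFS =====

-- the DP value: d n = Kribord maximum with n keystrokes
def d (n : Nat) : Int :=
  if n ≤ 6 then (n : Int) else (altLoop (n - 6) (2, 3, 4, 5, 6)).2.2.2.2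


-- altLoop iterates altStep; stepping commutes with the iteration
theorem altLoop_succ' (n : Nat) (w : Int × Int × Int × Int × Int) :
    altLoop (n + 1) w = altStep (altLoop n w) := by
  induction n generalizing w with
  | zero => rfl
  | succ m ih => show altLoop (m + 1) (altStep w) = _; rw [ih]; rfl

-- W n = window after n steps
def W (n : Nat) : Int × Int × Int × Int × Int := altLoop n (2, 3, 4, 5, 6)

theorem d_small (n : Nat) (h : n ≤ 6) : d n = (n : Int) := by simp [d, h]

theorem d_of_ge (n : Nat) : d (n + 7) = (W (n + 1)).2.2.2.2 := by
  simp [d, W]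

theorem W_comp (n : Nat) : W n = (d (n + 2), d (n + 3), d (n + 4), d (n + 5), d (n + 6)) := by
  induction n with
  | zero => simp [W, altLoop, d]
  | succ m ih =>
    have h1 : W (m + 1) = altStep (W m) := altLoop_succ' m _
    rw [h1, ih]
    refine Prod.ext rfl (Prod.ext rfl (Prod.ext rfl (Prod.ext rfl ?_)))
    show max (max (d (m + 6) + 1) (2 * d (m + 4))) (max (3 * d (m + 3)) (4 * d (m + 2)))
        = d (m + 1 + 6)
    rw [show m + 1 + 6 = m + 7 by ring, d_of_ge m, h1, ih]
    rfl

theorem d_rec (n : Nat) :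
    d (n + 7) = max (max (d (n + 6) + 1) (2 * d (n + 4))) (max (3 * d (n + 3)) (4 * d (n + 2))) := by
  rw [d_of_ge n, show W (n + 1) = altStep (W n) from altLoop_succ' n _, W_comp n]
  rfl

theorem d_succ_ge (n : Nat) : d n + 1 ≤ d (n + 1) := by
  rcases Nat.lt_or_ge n 6 with h | h
  · rw [d_small n (by omega), d_small (n + 1) (by omega)]; omega
  · obtain ⟨m, rfl⟩ := Nat.exists_eq_add_of_le h
    rw [show 6 + m + 1 = m + 7 by ring, show 6 + m = m + 6 by ring, d_rec m]
    exact le_trans (le_max_left _ _) (le_max_left _ _)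

theorem d_ge (n : Nat) : (n : Int) ≤ d n := by
  induction n with
  | zero => simp [d_small 0 (by omega)]
  | succ m ih =>
    have := d_succ_ge m
    push_cast
    omega

theorem d_nonneg (n : Nat) : 0 ≤ d n := le_trans (by positivity) (d_ge n)

theorem P3 (n : Nat) : 3 * d n ≤ d (n + 4) := by
  rcases Nat.lt_or_ge n 3 with h | h
  · rw [d_small n (by omega), d_small (n + 4) (by omega)]; omega
  · obtain ⟨m, rfl⟩ := Nat.exists_eq_add_of_le h
    rw [show 3 + m + 4 = m + 7 by ring, show 3 + m = m + 3 by ring, d_rec m]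
    exact le_trans (le_max_left _ _) (le_max_right _ _)

theorem P4 (n : Nat) : 4 * d n ≤ d (n + 5) := by
  rcases Nat.lt_or_ge n 2 with h | h
  · rw [d_small n (by omega), d_small (n + 5) (by omega)]; omega
  · obtain ⟨m, rfl⟩ := Nat.exists_eq_add_of_le h
    rw [show 2 + m + 5 = m + 7 by ring, show 2 + m = m + 2 by ring, d_rec m]
    exact le_trans (le_max_right _ _) (le_max_right _ _)

-- for n ≥ 7, the "+1" candidate never exceeds the multiplier candidates
theorem M (n : Nat) :
    d (n + 7) = max (2 * d (n + 4)) (max (3 * d (n + 3)) (4 * d (n + 2))) := by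
  induction n with
  | zero => decide
  | succ m ih =>
    rw [show m + 1 + 7 = m + 1 + 7 from rfl, show m + 1 + 7 = (m + 1) + 7 from rfl]
    rw [d_rec (m + 1)]
    have h1 : d (m + 1 + 6) + 1 ≤ max (2 * d (m + 1 + 4)) (max (3 * d (m + 1 + 3)) (4 * d (m + 1 + 2))) := by
      rw [show m + 1 + 6 = m + 7 by ring, ih]
      have a1 := d_succ_ge (m + 4)
      have a2 := d_succ_ge (m + 3)
      have a3 := d_succ_ge (m + 2)
      rw [show m + 1 + 4 = m + 4 + 1 by ring, show m + 1 + 3 = m + 3 + 1 by ring,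
          show m + 1 + 2 = m + 2 + 1 by ring]
      rcases max_cases (2 * d (m + 4)) (max (3 * d (m + 3)) (4 * d (m + 2))) with ⟨he, _⟩ | ⟨he, _⟩ <;>
        rw [he]
      · have : 2 * d (m + 4) + 1 ≤ 2 * d (m + 4 + 1) := by omega
        exact le_trans this (le_max_left _ _)
      · rcases max_cases (3 * d (m + 3)) (4 * d (m + 2)) with ⟨he2, _⟩ | ⟨he2, _⟩ <;> rw [he2]
        · have : 3 * d (m + 3) + 1 ≤ 3 * d (m + 3 + 1) := by omega
          exact le_trans this (le_trans (le_max_left _ _) (le_max_right _ _))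
        · have : 4 * d (m + 2) + 1 ≤ 4 * d (m + 2 + 1) := by omega
          exact le_trans this (le_trans (le_max_right _ _) (le_max_right _ _))
    apply le_antisymm
    · exact max_le (max_le h1 (le_max_left _ _)) (le_max_right _ _)
    · exact max_le (le_trans (le_max_right _ _) (le_max_left _ _)) (le_max_right _ _)

-- the growth ratio: 5·d(n) ≤ 4·d(n+1) for n ≥ 6
theorem R : ∀ n : Nat, 6 ≤ n → 5 * d n ≤ 4 * d (n + 1) := by
  intro n
  induction n using Nat.strong_induction_on with
  | _ n ih =>
    intro h6
    rcases Nat.lt_or_ge n 11 with h | h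
    · interval_cases n <;> decide
    · obtain ⟨m, rfl⟩ := Nat.exists_eq_add_of_le h
      rw [show 11 + m = (m + 4) + 7 by ring, M (m + 4)]
      have c1 : 5 * (2 * d (m + 4 + 4)) ≤ 4 * d (m + 4 + 7 + 1) := by
        have e : m + 4 + 7 + 1 = m + 4 + 4 + 4 := by omega
        rw [e]
        have := P3 (m + 4 + 4)
        have := d_nonneg (m + 4 + 4)
        omega
      have c2 : 5 * (3 * d (m + 4 + 3)) ≤ 4 * d (m + 4 + 7 + 1) := by
        have e : m + 4 + 7 + 1 = m + 4 + 3 + 5 := by omega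
        rw [e]
        have := P4 (m + 4 + 3)
        have := d_nonneg (m + 4 + 3)
        omega
      have c3 : 5 * (4 * d (m + 4 + 2)) ≤ 4 * d (m + 4 + 7 + 1) := by
        have e : m + 4 + 7 + 1 = m + 4 + 2 + 1 + 5 := by omega
        rw [e]
        have hr := ih (m + 4 + 2) (by omega) (by omega)
        have := P4 (m + 4 + 2 + 1)
        omega
      rcases max_cases (2 * d (m + 4 + 4)) (max (3 * d (m + 4 + 3)) (4 * d (m + 4 + 2))) with ⟨he, _⟩ | ⟨he, _⟩ <;> rw [he]
      · exact c1
      · rcases max_cases (3 * d (m + 4 + 3)) (4 * d (m + 4 + 2)) with ⟨he2, _⟩ | ⟨he2, _⟩ <;> rw [he2]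
        · exact c2
        · exact c3

-- one climbing step: a candidate with multiplier m ≥ 5 is dominated one index up
theorem Sstep (j : Nat) (m : Int) (hj : 1 ≤ j) (hm : 5 ≤ m) (h55 : j = 5 → 6 ≤ m) :
    d j * m ≤ d (j + 1) * (m - 1) := by
  rcases Nat.lt_or_ge j 5 with h | h
  · rw [d_small j (by omega), d_small (j + 1) (by omega)]
    push_cast
    nlinarith [hm, hj, h]
  · rcases Nat.eq_or_lt_of_le h with he | h6
    · subst he
      rw [d_small 5 (by omega), d_small 6 (by omega)]
      have := h55 rfl
      push_cast
      nlinarith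
    · have hr := R j (by omega)
      have h0 := d_nonneg (j + 1)
      nlinarith

-- domination: every inner-scan candidate is ≤ d i (i ≥ 12, by climbing)
theorem Dom12 : ∀ (t i j : Nat), 12 ≤ i → 1 ≤ j → j + 3 + t = i →
    d j * ((i : Int) - 1 - j) ≤ d i := by
  intro t
  induction t with
  | zero =>
    intro i j hi hj he
    obtain ⟨x, rfl⟩ : ∃ x, j = x + 4 := ⟨j - 4, by omega⟩
    have hie : i = x + 7 := by omega
    subst hie
    have := M x
    have h2 : 2 * d (x + 4) ≤ d (x + 7) := by
      rw [M x]; exact le_max_left _ _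
    have : ((x + 7 : Nat) : Int) - 1 - ((x + 4 : Nat) : Int) = 2 := by push_cast; ring
    rw [this]
    omega
  | succ t iht =>
    intro i j hi hj he
    rcases Nat.lt_or_ge t 2 with ht | ht
    · interval_cases t
      · -- multiplier 3
        obtain ⟨x, rfl⟩ : ∃ x, j = x + 3 := ⟨j - 3, by omega⟩
        have hie : i = x + 7 := by omega
        subst hie
        have h3 : 3 * d (x + 3) ≤ d (x + 7) := by
          rw [M x]; exact le_trans (le_max_left _ _) (le_max_right _ _)
        have : ((x + 7 : Nat) : Int) - 1 - ((x + 3 : Nat) : Int) = 3 := by push_cast; ring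
        rw [this]
        omega
      · -- multiplier 4
        obtain ⟨x, rfl⟩ : ∃ x, j = x + 2 := ⟨j - 2, by omega⟩
        have hie : i = x + 7 := by omega
        subst hie
        have h4 : 4 * d (x + 2) ≤ d (x + 7) := by
          rw [M x]; exact le_trans (le_max_right _ _) (le_max_right _ _)
        have : ((x + 7 : Nat) : Int) - 1 - ((x + 2 : Nat) : Int) = 4 := by push_cast; ring
        rw [this]
        omega
    · -- multiplier ≥ 5: climb
      have hm : (5 : Int) ≤ (i : Int) - 1 - j := by omega
      have h55 : j = 5 → (6 : Int) ≤ (i : Int) - 1 - j := by intro hj5; omega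
      have hs := Sstep j ((i : Int) - 1 - j) hj hm h55
      have hih := iht i (j + 1) hi (by omega) (by omega)
      have : ((i : Int) - 1 - j) - 1 = (i : Int) - 1 - ((j + 1 : Nat) : Int) := by push_cast; ring
      rw [this] at hs
      exact le_trans hs hih

theorem DomAll (i j : Nat) (hi : 7 ≤ i) (hj : 1 ≤ j) (hji : j + 3 ≤ i) :
    d j * ((i : Int) - 1 - j) ≤ d i := by
  rcases Nat.lt_or_ge i 12 with h | h
  · have hj8 : j ≤ 8 := by omega
    interval_cases i <;> interval_cases j <;> first | omega | decide
  · exact Dom12 (i - 3 - j) i j (by omega) hj (by omega)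


-- the outer loop body of port A, named for the proofs
def aBody (dp : List Int) (i : Int) : List Int :=
  (PySem.List.pyRange (i - 3) 0 (-1)).foldl (fun dp j =>
    PySem.List.pySetD dp i (max (PySem.List.pyGetD dp i 0) (PySem.List.pyGetD dp j 0 * (i - j - 1))))
    (PySem.List.pySetD dp i (PySem.List.pyGetD dp (i - 1) 0 + 1))

theorem solve_eq_body (N : Int) (h : ¬ N ≤ 6) :
    solve N = PySem.List.pyGetD
      ((PySem.List.pyRange 7 (N + 1) 1).foldl aBody (PySem.List.pyRange 0 (N + 1) 1)) N 0 := by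
  simp only [solve, if_neg h]
  rfl

-- the model of A's dp array after the outer loop has processed i = 7..k
def model (n k : Nat) : List Int :=
  (List.range (n + 1)).map (fun t => if t ≤ k then d t else (t : Int))

theorem model_length (n k : Nat) : (model n k).length = n + 1 := by simp [model]

theorem model_getD (n k t : Nat) (h : t ≤ n) :
    PySem.List.pyGetD (model n k) (t : Int) 0 = if t ≤ k then d t else (t : Int) := by
  rw [PySem.List.pyGetD_natCast, model, List.getD_eq_getElem?_getD]
  rw [List.getElem?_map]
  rw [List.getElem?_range (by omega : t < n + 1)]
  rfl

theorem model_set (n i : Nat) (h7 : 7 ≤ i) (_hin : i ≤ n) :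
    PySem.List.pySetD (model n (i - 1)) (i : Int) (d i) = model n i := by
  rw [PySem.List.pySetD_natCast]
  apply List.ext_getElem
  · simp [model]
  · intro t ht1 ht2
    rw [List.getElem_set]
    simp only [model, List.getElem_map, List.getElem_range]
    have ht : t < n + 1 := by simpa [model] using ht2
    by_cases he : i = t
    · subst he
      simp
    · simp only [if_neg he]
      by_cases hle : t ≤ i - 1
      · rw [if_pos hle, if_pos (by omega)]
      · rw [if_neg hle, if_neg (by omega)]

-- the inner loop only writes index i, reading index i and smaller indices
theorem inner_fold (i : Nat) (J : List Int) :
    ∀ (dp : List Int) (v : Int), i < dp.length → (∀ j ∈ J, 0 < j ∧ j < (i : Int)) →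
    J.foldl (fun dp j =>
        PySem.List.pySetD dp (i : Int) (max (PySem.List.pyGetD dp (i : Int) 0) (PySem.List.pyGetD dp j 0 * ((i : Int) - j - 1))))
      (PySem.List.pySetD dp (i : Int) v)
    = PySem.List.pySetD dp (i : Int)
        (J.foldl (fun v j => max v (PySem.List.pyGetD dp j 0 * ((i : Int) - j - 1))) v) := by
  induction J with
  | nil => intro dp v _ _; rfl
  | cons j J ih =>
    intro dp v hlen hmem
    obtain ⟨hj0, hji⟩ := hmem j List.mem_cons_self
    have hj' : j = ((j.toNat : Nat) : Int) := by omega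
    simp only [List.foldl_cons]
    rw [hj', PySem.List.pyGetD_pySetD_natCast dp i i v 0 hlen,
        PySem.List.pyGetD_pySetD_natCast dp i j.toNat v 0 hlen,
        if_pos rfl, if_neg (by omega)]
    rw [PySem.List.pySetD_natCast, PySem.List.pySetD_natCast, List.set_set]
    rw [← PySem.List.pySetD_natCast]
    exact ih dp _ hlen (fun x hx => hmem x (List.mem_cons_of_mem _ hx))

-- running max of a bounded projection is bounded
theorem foldmax_le (g : Int → Int) (T : Int) (L : List Int) :
    ∀ v0, v0 ≤ T → (∀ j ∈ L, g j ≤ T) → L.foldl (fun v j => max v (g j)) v0 ≤ T := by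
  induction L with
  | nil => intro v0 h _; exact h
  | cons j J ih =>
    intro v0 h hb
    exact ih _ (max_le h (hb j (List.mem_cons_self))) (fun x hx => hb x (List.mem_cons_of_mem _ hx))

-- the inner running max over j = i-3 .. 1 computes exactly d i
theorem foldmax_eq (n i : Nat) (h7 : 7 ≤ i) (hin : i ≤ n) :
    (PySem.List.pyRange ((i : Int) - 3) 0 (-1)).foldl
      (fun v j => max v (PySem.List.pyGetD (model n (i - 1)) j 0 * ((i : Int) - j - 1)))
      (PySem.List.pyGetD (model n (i - 1)) ((i : Int) - 1) 0 + 1) = d i := by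
  have hv0 : PySem.List.pyGetD (model n (i - 1)) ((i : Int) - 1) 0 = d (i - 1) := by
    rw [show (i : Int) - 1 = ((i - 1 : Nat) : Int) by omega, model_getD n (i - 1) (i - 1) (by omega),
        if_pos (le_refl _)]
  have hread : ∀ j : Int, 0 < j → j ≤ (i : Int) - 3 →
      PySem.List.pyGetD (model n (i - 1)) j 0 = d j.toNat := by
    intro j hj0 hj3
    rw [show j = ((j.toNat : Nat) : Int) by omega, model_getD n (i - 1) j.toNat (by omega),
        if_pos (by omega), Int.toNat_natCast]
  have hcongr : (PySem.List.pyRange ((i : Int) - 3) 0 (-1)).foldl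
      (fun v j => max v (PySem.List.pyGetD (model n (i - 1)) j 0 * ((i : Int) - j - 1)))
      (d (i - 1) + 1)
    = (PySem.List.pyRange ((i : Int) - 3) 0 (-1)).foldl
      (fun v j => max v (d j.toNat * ((i : Int) - j - 1))) (d (i - 1) + 1) := by
    apply PySem.List.foldl_congr_mem
    intro acc x hx
    obtain ⟨hx0, hx3⟩ := (PySem.List.mem_pyRange_neg_one).1 hx
    rw [hread x hx0 hx3]
  rw [hv0, hcongr]
  have hmemJ : ∀ t : Nat, 0 < t → t + 3 ≤ i → ((t : Nat) : Int) ∈ PySem.List.pyRange ((i : Int) - 3) 0 (-1) := by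
    intro t ht0 ht3
    rw [PySem.List.mem_pyRange_neg_one]
    omega
  have hub := foldmax_le (fun j => d j.toNat * ((i : Int) - j - 1)) (d i)
    (PySem.List.pyRange ((i : Int) - 3) 0 (-1)) (d (i - 1) + 1)
    (by have := d_succ_ge (i - 1); rw [show i - 1 + 1 = i by omega] at this; exact this)
    (by
      intro j hj
      obtain ⟨hj0, hj3⟩ := (PySem.List.mem_pyRange_neg_one).1 hj
      have := DomAll i j.toNat h7 (by omega) (by omega)
      show d j.toNat * ((i : Int) - j - 1) ≤ d i
      rw [show (i : Int) - j - 1 = (i : Int) - 1 - ((j.toNat : Nat) : Int) by omega]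
      exact this)
  have hlb := PySem.List.le_foldl_max_int (PySem.List.pyRange ((i : Int) - 3) 0 (-1))
    (fun j => d j.toNat * ((i : Int) - j - 1)) (d (i - 1) + 1)
  obtain ⟨hlb0, hlbmem⟩ := hlb
  have g3 := hlbmem _ (hmemJ (i - 3) (by omega) (by omega))
  have g4 := hlbmem _ (hmemJ (i - 4) (by omega) (by omega))
  have g5 := hlbmem _ (hmemJ (i - 5) (by omega) (by omega))
  simp only [Int.toNat_natCast] at g3 g4 g5
  rw [show (i : Int) - ((i - 3 : Nat) : Int) - 1 = 2 by omega] at g3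
  rw [show (i : Int) - ((i - 4 : Nat) : Int) - 1 = 3 by omega] at g4
  rw [show (i : Int) - ((i - 5 : Nat) : Int) - 1 = 4 by omega] at g5
  apply le_antisymm hub
  have hd : d i = max (max (d (i - 1) + 1) (2 * d (i - 3))) (max (3 * d (i - 4)) (4 * d (i - 5))) := by
    have := d_rec (i - 7)
    rw [show i - 7 + 7 = i by omega, show i - 7 + 6 = i - 1 by omega,
        show i - 7 + 4 = i - 3 by omega, show i - 7 + 3 = i - 4 by omega,
        show i - 7 + 2 = i - 5 by omega] at this
    exact this
  rw [hd]
  refine max_le (max_le hlb0 ?_) (max_le ?_ ?_)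
  · rw [mul_comm]; exact g3
  · rw [mul_comm]; exact g4
  · rw [mul_comm]; exact g5

theorem outer_step (n i : Nat) (h7 : 7 ≤ i) (hin : i ≤ n) :
    aBody (model n (i - 1)) (i : Int) = model n i := by
  rw [aBody]
  have hv0 : (i : Int) - 1 = (i : Int) - 1 := rfl
  rw [inner_fold i _ (model n (i - 1)) _ (by rw [model_length]; omega)
    (by intro j hj; obtain ⟨h1, h2⟩ := (PySem.List.mem_pyRange_neg_one).1 hj; exact ⟨h1, by omega⟩)]
  rw [foldmax_eq n i h7 hin]
  exact model_set n i h7 hin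

theorem outer_loop (n : Nat) (_hn : 7 ≤ n) :
    ∀ m, 7 ≤ m → m ≤ n →
    (PySem.List.pyRange 7 ((m : Int) + 1) 1).foldl aBody (model n 6) = model n m := by
  intro m h7m
  induction m, h7m using Nat.le_induction with
  | base =>
    intro h7n
    rw [show ((7 : Nat) : Int) = (7 : Int) by norm_num, PySem.List.pyRange_one_singleton]
    simp only [List.foldl_cons, List.foldl_nil]
    have := outer_step n 7 (by omega) h7n
    rw [show (7 : Nat) - 1 = 6 by norm_num] at this
    simpa using this
  | succ m h7m ih =>
    intro hmn
    rw [show ((m + 1 : Nat) : Int) + 1 = ((m : Int) + 1) + 1 by push_cast; ring,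
        PySem.List.pyRange_one_succ_right (by omega), List.foldl_append, ih (by omega)]
    simp only [List.foldl_cons, List.foldl_nil]
    have := outer_step n (m + 1) (by omega) hmn
    rw [show ((m + 1 : Nat) : Int) = (m : Int) + 1 by push_cast; ring,
        show m + 1 - 1 = m by omega] at this
    exact this

theorem solve_eq_d (N : Int) (h : 7 ≤ N) : solve N = d N.toNat := by
  have hne : ¬ N ≤ 6 := by omega
  set n := N.toNat
  have hN : N = (n : Int) := by omega
  have h7n : 7 ≤ n := by omega
  rw [solve_eq_body N hne, hN]
  have hinit : PySem.List.pyRange 0 ((n : Int) + 1) 1 = model n 6 := by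
    rw [PySem.List.pyRange_one, model]
    rw [show ((n : Int) + 1 - 0).toNat = n + 1 by omega]
    apply List.map_congr_left
    intro t ht
    have ht' : t ≤ 6 ∨ ¬ t ≤ 6 := em _
    rcases Nat.lt_or_ge t 7 with h' | h'
    · rw [if_pos (by omega), d_small t (by omega)]; ring
    · rw [if_neg (by omega)]; ring
  rw [hinit, outer_loop n h7n n h7n (le_refl n)]
  rw [model_getD n n n (le_refl n), if_pos (le_refl n)]

theorem alt_eq_d (N : Int) (h : 7 ≤ N) : solve_alt N = d N.toNat := by
  have hne : ¬ N ≤ 6 := by omega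
  rw [solve_alt, if_neg hne, d, if_neg (by omega), show (N - 6).toNat = N.toNat - 6 by omega]

-- ===== VERDICT (by name: the statement is the Claim_ definition above) =====
theorem solve_spec : Claim_equal_solve := by
  intro N _
  unfold Spec_solve
  by_cases h : N ≤ 6
  · simp [solve, solve_alt, h]
  · rw [solve_eq_d N (by omega), alt_eq_d N (by omega)]
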